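-- pv_equiv track=rewrite | github.com/maxfie1d/atcoder | exponential.py | solve
-- ===== SOURCE A (Python) =====
-- def solve(X):
--     r = 0
--     for b in range(1, 33):
--         for p in range(2, 11):
--             a = b ** p
--             if a <= X:
--                 r = max(r, a)
--     return int(r)
-- ===== SOURCE B (Python) =====
-- # Precompute all b**p candidates once, sort them, then a single early-exit
-- # scan returns the largest candidate <= X.
-- CANDS = sorted(b ** p for b in range(1, 33) for p in range(2, 11))
--
--
-- def solve(X):
--     r = 0
--     for c in CANDS:
--         if c > X:
--             break
--         r = c
--     return r
-- ===== Notes on version B (the rewrite author's own statement) =====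
-- stated objective: alternative
-- what changed: B precomputes the fixed list of all b**p candidates once at module level, sorts it, and answers each query with a single early-exit scan keeping the last candidate <= X, instead of A's nested b/p loops with a running max.
import Mathlib
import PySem

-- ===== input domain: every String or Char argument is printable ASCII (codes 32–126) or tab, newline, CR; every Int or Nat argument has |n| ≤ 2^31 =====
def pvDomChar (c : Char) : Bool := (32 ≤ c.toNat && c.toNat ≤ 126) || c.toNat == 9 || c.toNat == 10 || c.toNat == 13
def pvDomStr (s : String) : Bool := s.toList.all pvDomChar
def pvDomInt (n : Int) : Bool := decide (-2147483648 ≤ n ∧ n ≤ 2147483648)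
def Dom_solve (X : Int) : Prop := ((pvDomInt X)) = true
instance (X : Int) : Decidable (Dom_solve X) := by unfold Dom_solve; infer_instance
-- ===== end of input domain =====

-- B precomputes the sorted list of all b**p candidates once and answers with one
-- early-exit scan, instead of A's nested loops with a running max (objective: alternative).

-- ===== PORT A =====
def solve (X : Int) : Int :=
  (PySem.List.pyRange 1 33 1).foldl (fun r b =>
    (PySem.List.pyRange 2 11 1).foldl (fun r p =>
      let a := b ^ p.toNat
      if a ≤ X then max r a else r) r) 0

-- ===== PORT B =====
-- CANDS = sorted(b ** p for b in range(1, 33) for p in range(2, 11))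
def pvCands : List Int :=
  PySem.List.sorted
    ((PySem.List.pyRange 1 33 1).flatMap (fun b =>
      (PySem.List.pyRange 2 11 1).map (fun p => b ^ p.toNat)))
    (fun x => x) false

-- the for-loop with break: keep the last candidate ≤ X
def pvScan (X : Int) : Int → List Int → Int
  | r, [] => r
  | r, c :: t => if c > X then r else pvScan X c t

def solve_alt (X : Int) : Int := pvScan X 0 pvCands

-- ===== PRECONDITION & SPEC =====
def Spec_solve (X : Int) (out : Int) : Prop := out = solve_alt X
instance (X : Int) (out : Int) : Decidable (Spec_solve X out) := by unfold Spec_solve; infer_instance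

-- ===== CLAIM (what is proved, stated in full; the proofs are below) =====
def Claim_equal_solve : Prop := ∀ (X : Int), Dom_solve X → Spec_solve X (solve X)

-- ===== LEMMAS AND PROOFS =====

-- the raw (unsorted) candidate list, in A's loop order
def pvCandsRaw : List Int :=
  (PySem.List.pyRange 1 33 1).flatMap (fun b =>
    (PySem.List.pyRange 2 11 1).map (fun p => b ^ p.toNat))

-- A's nested fold is the max-if fold over the flattened candidate list
theorem solve_eq_foldRaw (X : Int) :
    solve X = pvCandsRaw.foldl (fun r a => if a ≤ X then max r a else r) 0 := by
  simp [solve, pvCandsRaw, List.foldl_flatMap, List.foldl_map]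

-- max-if fold = max-fold over the filtered list
theorem foldIf_eq_filter (X : Int) :
    ∀ (L : List Int) (r : Int),
      L.foldl (fun r a => if a ≤ X then max r a else r) r
        = (L.filter (fun a => a ≤ X)).foldl max r := by
  intro L
  induction L with
  | nil => intro r; rfl
  | cons c t ih =>
    intro r
    by_cases h : c ≤ X <;> simp [h, ih]

-- the early-exit scan on a sorted list = max-fold over the filtered list
theorem scan_eq_filter (X : Int) :
    ∀ (L : List Int) (r : Int), L.Pairwise (· ≤ ·) → (∀ a ∈ L, r ≤ a) →
      pvScan X r L = (L.filter (fun a => a ≤ X)).foldl max r := by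
  intro L
  induction L with
  | nil => intro r _ _; rfl
  | cons c t ih =>
    intro r hp hr
    rcases List.pairwise_cons.mp hp with ⟨hc, hpt⟩
    by_cases h : c > X
    · have hft : t.filter (fun a => a ≤ X) = [] := by
        apply List.filter_eq_nil_iff.mpr
        intro a ha
        have := hc a ha
        simp only [decide_eq_true_eq]
        omega
      simp [pvScan, h, hft]
    · have hcx : c ≤ X := by omega
      have hrc : r ≤ c := hr c (List.mem_cons_self ..)
      have := ih c hpt hc
      simp [pvScan, h, hcx, this, max_eq_right hrc]

-- pvCands is a sorted permutation of the raw list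
theorem pvCands_perm : pvCands.Perm pvCandsRaw :=
  PySem.List.sorted_perm ..

theorem pvCands_pairwise : pvCands.Pairwise (· ≤ ·) := by
  have := PySem.List.sorted_pairwise
    (xs := (PySem.List.pyRange 1 33 1).flatMap (fun b =>
      (PySem.List.pyRange 2 11 1).map (fun p => b ^ p.toNat)))
    (key := fun x : Int => x)
  exact this

theorem pvCands_nonneg : ∀ a ∈ pvCands, (0 : Int) ≤ a := by
  intro a ha
  have : a ∈ pvCandsRaw := pvCands_perm.mem_iff.mp ha
  simp only [pvCandsRaw, List.mem_flatMap, List.mem_map] at this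
  rcases this with ⟨b, hb, p, _, rfl⟩
  have hb1 : 1 ≤ b := (PySem.List.mem_pyRange_one.mp hb).1
  positivity

-- ===== VERDICT (by name: the statement is the Claim_ definition above) =====
theorem solve_spec : Claim_equal_solve := by
  intro X _
  show solve X = solve_alt X
  rw [solve_eq_foldRaw, foldIf_eq_filter]
  rw [show solve_alt X = pvScan X 0 pvCands from rfl,
      scan_eq_filter X pvCands 0 pvCands_pairwise pvCands_nonneg]
  exact ((pvCands_perm.filter _).foldl_eq (f := max) (b := 0)).symm
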